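-- pv_equiv track=rewrite | github.com/luwei0917/DynamicBind | helper_functions.py | locate_starting_site
-- ===== SOURCE A (Python) =====
-- def locate_starting_site(raw_result_ref, raw_result_pdb):
--     # start when consecutively matched 10 residues.
--     match_count = 0
--     for idx, (ref_res, pdb_res) in enumerate(zip(raw_result_ref, raw_result_pdb)):
--         if ref_res == pdb_res:
--             match_count += 1
--         else:
--             match_count = 0
--         if match_count == 10:
--             return idx - 9
--     return -1
-- ===== SOURCE B (Python) =====
-- from itertools import groupby
--
-- def locate_starting_site(raw_result_ref, raw_result_pdb):
--     # collapse the match stream into runs; answer is the start of the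
--     # first run of >= 10 consecutive matches, else -1.
--     matches = [a == b for a, b in zip(raw_result_ref, raw_result_pdb)]
--     start = 0
--     for key, grp in groupby(matches):
--         n = sum(1 for _ in grp)
--         if key and n >= 10:
--             return start
--         start += n
--     return -1
-- ===== Notes on version B (the rewrite author's own statement) =====
-- stated objective: alternative
-- what changed: Replaces the running match-counter loop with a run-length decomposition: build the boolean match stream, collapse it into runs with itertools.groupby, and return the start index of the first True run of length >= 10.
import Mathlib
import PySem

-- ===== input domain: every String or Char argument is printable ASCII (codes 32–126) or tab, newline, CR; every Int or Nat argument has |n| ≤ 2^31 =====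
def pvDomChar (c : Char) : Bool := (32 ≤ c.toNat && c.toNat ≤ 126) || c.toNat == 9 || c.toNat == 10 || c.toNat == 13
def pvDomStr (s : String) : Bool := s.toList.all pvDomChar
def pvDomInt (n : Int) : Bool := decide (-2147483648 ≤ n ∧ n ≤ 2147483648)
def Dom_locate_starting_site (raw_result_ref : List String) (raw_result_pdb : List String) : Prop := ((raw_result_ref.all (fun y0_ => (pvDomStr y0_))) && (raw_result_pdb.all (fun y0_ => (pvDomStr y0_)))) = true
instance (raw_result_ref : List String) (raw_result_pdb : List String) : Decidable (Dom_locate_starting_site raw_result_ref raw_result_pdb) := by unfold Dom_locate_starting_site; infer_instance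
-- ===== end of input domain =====

-- B replaces A's running match-counter with a run-length (groupby) decomposition of the boolean match stream; objective: alternative (same cost, not faster).


-- ===== PORT A =====
-- A: running counter of consecutive matches; return idx-9 when it reaches 10.
def pvLoopA (l : List (String × String)) (idx : Int) (cnt : Int) : Int :=
  match l with
  | [] => -1
  | (r, p) :: rest =>
    let cnt' := if r == p then cnt + 1 else 0
    if cnt' == 10 then idx - 9 else pvLoopA rest (idx + 1) cnt'

def locate_starting_site (raw_result_ref : List String) (raw_result_pdb : List String) : Int :=
  pvLoopA (List.zip raw_result_ref raw_result_pdb) 0 0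

-- ===== PORT B =====
-- B: collapse the boolean match stream into runs (itertools.groupby), then
-- return the start index of the first True run of length >= 10, else -1.
def pvRuns : List Bool → List (Bool × Nat)
  | [] => []
  | b :: rest =>
    match pvRuns rest with
    | [] => [(b, 1)]
    | (k, n) :: t => if b == k then (k, n + 1) :: t else (b, 1) :: (k, n) :: t

def pvWalk : List (Bool × Nat) → Int → Int
  | [], _ => -1
  | (k, n) :: t, start => if k && decide (10 ≤ n) then start else pvWalk t (start + (n : Int))

def locate_starting_site_alt (raw_result_ref : List String) (raw_result_pdb : List String) : Int :=
  pvWalk (pvRuns ((List.zip raw_result_ref raw_result_pdb).map (fun p => p.1 == p.2))) 0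

-- ===== PRECONDITION & SPEC =====
def Spec_locate_starting_site (raw_result_ref : List String) (raw_result_pdb : List String) (out : Int) : Prop := out = locate_starting_site_alt raw_result_ref raw_result_pdb
instance (raw_result_ref : List String) (raw_result_pdb : List String) (out : Int) : Decidable (Spec_locate_starting_site raw_result_ref raw_result_pdb out) := by unfold Spec_locate_starting_site; infer_instance

-- ===== CLAIM (what is proved, stated in full; the proofs are below) =====
def Claim_equal_locate_starting_site : Prop := ∀ (raw_result_ref : List String) (raw_result_pdb : List String), Dom_locate_starting_site raw_result_ref raw_result_pdb → Spec_locate_starting_site raw_result_ref raw_result_pdb (locate_starting_site raw_result_ref raw_result_pdb)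

-- ===== LEMMAS AND PROOFS =====

-- A's loop on the boolean match stream.
def pvLoopB (m : List Bool) (idx : Int) (cnt : Int) : Int :=
  match m with
  | [] => -1
  | b :: rest =>
    let cnt' := if b then cnt + 1 else 0
    if cnt' == 10 then idx - 9 else pvLoopB rest (idx + 1) cnt'

-- runs alternate in their keys
def pvAlt : List (Bool × Nat) → Prop
  | [] => True
  | [_] => True
  | a :: b :: t => a.1 ≠ b.1 ∧ pvAlt (b :: t)

lemma pvLoopA_eq_loopB (l : List (String × String)) (idx cnt : Int) :
    pvLoopA l idx cnt = pvLoopB (l.map (fun p => p.1 == p.2)) idx cnt := by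
  induction l generalizing idx cnt with
  | nil => rfl
  | cons hd tl ih =>
    obtain ⟨r, p⟩ := hd
    simp only [pvLoopA, pvLoopB, List.map_cons]
    split <;> simp [ih]

def pvExpand (g : List (Bool × Nat)) : List Bool :=
  g.flatMap (fun p => List.replicate p.2 p.1)

lemma runs_expand (m : List Bool) : pvExpand (pvRuns m) = m := by
  induction m with
  | nil => rfl
  | cons b rest ih =>
    simp only [pvRuns]
    cases h : pvRuns rest with
    | nil =>
      have hrest : rest = [] := by rw [← ih, h]; rfl
      simp [pvExpand, hrest]
    | cons hd t =>
      obtain ⟨k, n⟩ := hd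
      rw [h] at ih
      by_cases hb : b = k
      · subst hb
        simp only [BEq.rfl, if_true]
        calc pvExpand ((b, n + 1) :: t)
            = b :: pvExpand ((b, n) :: t) := by
              simp [pvExpand, List.flatMap_cons, List.replicate_succ]
          _ = b :: rest := by rw [ih]
      · have hbk : (b == k) = false := by simp [hb]
        simp only [hbk, Bool.false_eq_true, if_false]
        calc pvExpand ((b, 1) :: (k, n) :: t)
            = b :: pvExpand ((k, n) :: t) := by
              simp [pvExpand, List.flatMap_cons]
          _ = b :: rest := by rw [ih]

lemma runs_pos (m : List Bool) : ∀ p ∈ pvRuns m, 1 ≤ p.2 := by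
  induction m with
  | nil => simp [pvRuns]
  | cons b rest ih =>
    simp only [pvRuns]
    cases h : pvRuns rest with
    | nil => simp
    | cons hd t =>
      obtain ⟨k, n⟩ := hd
      rw [h] at ih
      by_cases hb : (b == k) = true
      · simp only [hb, if_true]
        intro p hp
        rcases List.mem_cons.mp hp with hp | hp
        · subst hp; simp
        · exact ih p (List.mem_cons_of_mem _ hp)
      · simp only [hb, Bool.false_eq_true, if_false]
        intro p hp
        rcases List.mem_cons.mp hp with hp | hp
        · subst hp; simp
        · exact ih p hp

lemma runs_alt (m : List Bool) : pvAlt (pvRuns m) := by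
  induction m with
  | nil => trivial
  | cons b rest ih =>
    simp only [pvRuns]
    cases h : pvRuns rest with
    | nil => trivial
    | cons hd t =>
      obtain ⟨k, n⟩ := hd
      rw [h] at ih
      by_cases hb : b = k
      · subst hb
        simp only [BEq.rfl, if_true]
        cases t with
        | nil => trivial
        | cons hd2 t2 => exact ⟨ih.1, ih.2⟩
      · have hbk : (b == k) = false := by simp [hb]
        simp only [hbk, Bool.false_eq_true, if_false]
        exact ⟨hb, ih⟩

-- a false head (or empty list) makes the incoming counter irrelevant
lemma loopB_reset (m : List Bool) (idx cnt : Int)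
    (h : m = [] ∨ m.head? = some false) :
    pvLoopB m idx cnt = pvLoopB m idx 0 := by
  rcases h with h | h
  · subst h; rfl
  · cases m with
    | nil => rfl
    | cons b rest =>
      simp only [List.head?_cons, Option.some.injEq] at h
      subst h
      simp [pvLoopB]

lemma loopB_false_run (n : Nat) (rest : List Bool) (idx : Int) :
    pvLoopB (List.replicate n false ++ rest) idx 0 = pvLoopB rest (idx + n) 0 := by
  induction n generalizing idx with
  | zero => simp
  | succ k ih =>
    simp only [List.replicate_succ, List.cons_append, pvLoopB]
    norm_num
    rw [ih (idx + 1)]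
    congr 1
    push_cast
    ring

lemma loopB_true_short (n : Nat) (rest : List Bool) (idx cnt : Int)
    (h0 : 0 ≤ cnt) (h : cnt + n < 10) :
    pvLoopB (List.replicate n true ++ rest) idx cnt = pvLoopB rest (idx + n) (cnt + n) := by
  induction n generalizing idx cnt with
  | zero => simp
  | succ k ih =>
    simp only [List.replicate_succ, List.cons_append, pvLoopB]
    have hne : ((cnt + 1) == (10 : Int)) = false := by
      simp only [beq_eq_false_iff_ne, ne_eq]
      push_cast at h
      omega
    simp only [if_true, hne, Bool.false_eq_true, if_false]
    rw [ih (idx + 1) (cnt + 1) (by omega) (by push_cast at h ⊢; omega)]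
    congr 1 <;> push_cast <;> ring

lemma loopB_true_long (n : Nat) (rest : List Bool) (idx cnt : Int)
    (h0 : 0 ≤ cnt) (h9 : cnt ≤ 9) (h : 10 ≤ cnt + n) :
    pvLoopB (List.replicate n true ++ rest) idx cnt = idx - cnt := by
  induction n generalizing idx cnt with
  | zero => omega
  | succ k ih =>
    simp only [List.replicate_succ, List.cons_append, pvLoopB]
    by_cases hc : cnt + 1 = 10
    · have : ((cnt + 1) == (10 : Int)) = true := by simp [hc]
      simp only [if_true, this]
      omega
    · have hne : ((cnt + 1) == (10 : Int)) = false := by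
        simp only [beq_eq_false_iff_ne, ne_eq]; exact hc
      simp only [if_true, hne, Bool.false_eq_true, if_false]
      rw [ih (idx + 1) (cnt + 1) (by omega) (by omega) (by push_cast at h ⊢; omega)]
      ring

lemma main_lemma (g : List (Bool × Nat))
    (halt : pvAlt g) (hpos : ∀ p ∈ g, 1 ≤ p.2) :
    ∀ idx : Int, pvLoopB (pvExpand g) idx 0 = pvWalk g idx := by
  induction g with
  | nil => intro idx; rfl
  | cons hd t ih =>
    obtain ⟨k, n⟩ := hd
    intro idx
    have halt' : pvAlt t := by
      cases t with
      | nil => trivial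
      | cons hd2 t2 => exact halt.2
    have hpos' : ∀ p ∈ t, 1 ≤ p.2 := fun p hp => hpos p (List.mem_cons_of_mem _ hp)
    have ihx := ih halt' hpos'
    have hexp : pvExpand ((k, n) :: t) = List.replicate n k ++ pvExpand t := by
      simp [pvExpand, List.flatMap_cons]
    rw [hexp]
    cases k with
    | false =>
      rw [loopB_false_run, ihx]
      simp only [pvWalk, Bool.false_and, Bool.false_eq_true, if_false]
    | true =>
      by_cases hlong : 10 ≤ n
      · rw [loopB_true_long n _ idx 0 (by norm_num) (by norm_num) (by push_cast; omega)]
        simp [pvWalk, hlong]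
      · rw [loopB_true_short n _ idx 0 (by norm_num) (by push_cast; omega)]
        have hreset : pvExpand t = [] ∨ (pvExpand t).head? = some false := by
          cases t with
          | nil => left; rfl
          | cons hd2 t2 =>
            obtain ⟨k2, n2⟩ := hd2
            have hk2 : k2 = false := by
              cases k2
              · rfl
              · exact absurd rfl halt.1
            have hn2 : 1 ≤ n2 := hpos (k2, n2) (by simp)
            right
            subst hk2
            cases n2 with
            | zero => omega
            | succ m2 => simp [pvExpand, List.flatMap_cons, List.replicate_succ]
        rw [loopB_reset _ _ _ hreset, ihx]
        have hshort : (true && decide (10 ≤ n)) = false := by simp [hlong]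
        simp only [pvWalk, hshort, Bool.false_eq_true, if_false]

-- ===== VERDICT (by name: the statement is the Claim_ definition above) =====
theorem locate_starting_site_spec : Claim_equal_locate_starting_site := by
  intro ref pdb _
  unfold Spec_locate_starting_site locate_starting_site locate_starting_site_alt
  rw [pvLoopA_eq_loopB]
  have h := main_lemma (pvRuns ((List.zip ref pdb).map (fun p => p.1 == p.2)))
    (runs_alt _) (runs_pos _) 0
  rw [runs_expand] at h
  exact h
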